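-- pv_equiv track=rewrite | github.com/prskid1000/cortex-skill | scripts/claw/src/claw/xml/xslt.py | _xpath_string_literal
-- ===== SOURCE A (Python) =====
-- def _xpath_string_literal(value: str) -> str:
--     """Return an XPath 1.0 string literal that evaluates to `value`.
--
--     Handles both quote types. If the value contains both kinds, wrap with
--     concat() since XPath 1.0 has no escape mechanism for quotes.
--     """
--     if "'" not in value:
--         return f"'{value}'"
--     if '"' not in value:
--         return f'"{value}"'
--     parts: list[str] = []
--     buf = ""
--     for ch in value:
--         if ch == "'":
--             if buf:
--                 parts.append(f"'{buf}'")
--                 buf = ""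
--             parts.append('"\'"')
--         else:
--             buf += ch
--     if buf:
--         parts.append(f"'{buf}'")
--     return "concat(" + ", ".join(parts) + ")"
-- ===== SOURCE B (Python) =====
-- def _xpath_string_literal(value: str) -> str:
--     """Return an XPath 1.0 string literal that evaluates to `value`.
--
--     Alternative decomposition: recursive run-splitting. When both quote kinds
--     occur, `_pieces` peels the string piece by piece (a `"'"` piece per single
--     quote, a single-quoted maximal run otherwise); the plain cases pick the
--     wrapping quote arithmetically instead of two early returns.
--     """
--     if "'" in value and '"' in value:
--         return "concat(" + ", ".join(_pieces(value)) + ")"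
--     q = '"' if "'" in value else "'"
--     return q + value + q
--
--
-- def _pieces(s: str) -> list:
--     if not s:
--         return []
--     if s[0] == "'":
--         return ['"\'"'] + _pieces(s[1:])
--     i = 0
--     while i < len(s) and s[i] != "'":
--         i += 1
--     return ["'" + s[:i] + "'"] + _pieces(s[i:])
-- ===== Notes on version B (the rewrite author's own statement) =====
-- stated objective: alternative
-- what changed: Replaces A's iterative character scan with a mutable flush buffer by a recursive run-splitting helper that peels one separator piece or one maximal quote-free run per step, and collapses A's two early-return guards into one arithmetic choice of the wrapping quote.
import Mathlib
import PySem

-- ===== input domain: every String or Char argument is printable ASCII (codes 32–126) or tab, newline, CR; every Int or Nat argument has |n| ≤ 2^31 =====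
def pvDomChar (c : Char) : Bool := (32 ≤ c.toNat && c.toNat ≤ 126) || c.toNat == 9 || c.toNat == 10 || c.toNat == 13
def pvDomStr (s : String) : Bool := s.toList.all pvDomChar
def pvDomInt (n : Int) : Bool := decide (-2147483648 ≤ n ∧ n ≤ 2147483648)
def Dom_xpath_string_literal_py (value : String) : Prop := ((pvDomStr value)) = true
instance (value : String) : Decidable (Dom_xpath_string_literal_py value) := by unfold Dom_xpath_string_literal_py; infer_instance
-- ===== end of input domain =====

-- B replaces A's buffered character scan by a recursive run-splitting helper and folds the two guard returns into one quote choice (alternative decomposition, same cost).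


-- ===== PORT A =====
-- A's loop: character scan with a mutable buffer, flushing at each single quote, plus the final flush
def pvQuote (buf : List Char) : List Char := '\'' :: (buf ++ ['\''])
def pvSep : List Char := ['"', '\'', '"']

def pvPartsA (cs : List Char) : List (List Char) :=
  let st := cs.foldl
    (fun (s : List (List Char) × List Char) ch =>
      if ch = '\'' then
        ((if s.2 ≠ [] then s.1 ++ [pvQuote s.2] else s.1) ++ [pvSep], [])
      else (s.1, s.2 ++ [ch]))
    ([], [])
  if st.2 ≠ [] then st.1 ++ [pvQuote st.2] else st.1

def xpath_string_literal_py (value : String) : String :=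
  if PySem.Str.isIn "'" value = false then
    String.mk ('\'' :: (value.toList ++ ['\'']))
  else if PySem.Str.isIn "\"" value = false then
    String.mk ('"' :: (value.toList ++ ['"']))
  else
    String.mk ("concat(".toList ++ PySem.Chars.join [',', ' '] (pvPartsA value.toList) ++ [')'])

-- ===== PORT B =====
-- B's helper `_pieces`: recursive run-splitting; the while-loop index scan and the
-- slices s[:i] / s[i:] are ported as takeWhile / dropWhile on (· ≠ '\''), which is
-- exact: i counts exactly the leading non-single-quote characters.
def pvPiecesB : List Char → List (List Char)
  | [] => []
  | c :: cs =>
    if c = '\'' then ['"', '\'', '"'] :: pvPiecesB cs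
    else
      ('\'' :: ((c :: cs).takeWhile (· ≠ '\'') ++ ['\''])) ::
        pvPiecesB ((c :: cs).dropWhile (· ≠ '\''))
termination_by l => l.length
decreasing_by
  · simp
  · rename_i hc
    refine Nat.lt_of_le_of_lt (?_ : _ ≤ cs.length) (by simp)
    rw [List.dropWhile_cons, if_pos (by simp [hc])]
    exact List.length_dropWhile_le _ cs

def xpath_string_literal_py_alt (value : String) : String :=
  if PySem.Str.isIn "'" value && PySem.Str.isIn "\"" value then
    String.mk ("concat(".toList ++ PySem.Chars.join [',', ' '] (pvPiecesB value.toList) ++ [')'])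
  else
    let q : Char := if PySem.Str.isIn "'" value then '"' else '\''
    String.mk (q :: (value.toList ++ [q]))

-- ===== PRECONDITION & SPEC =====
def Spec_xpath_string_literal_py (value : String) (out : String) : Prop := out = xpath_string_literal_py_alt value
instance (value : String) (out : String) : Decidable (Spec_xpath_string_literal_py value out) := by unfold Spec_xpath_string_literal_py; infer_instance

-- ===== CLAIM (what is proved, stated in full; the proofs are below) =====
def Claim_equal_xpath_string_literal_py : Prop := ∀ (value : String), Dom_xpath_string_literal_py value → Spec_xpath_string_literal_py value (xpath_string_literal_py value)

-- ===== LEMMAS AND PROOFS =====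

/-- reference split of a char list at single quotes (always nonempty) -/
def pvSplitQ : List Char → List (List Char)
  | [] => [[]]
  | c :: cs =>
    if c = '\'' then [] :: pvSplitQ cs
    else
      match pvSplitQ cs with
      | [] => [[c]]
      | s :: r => (c :: s) :: r

theorem pvSplitQ_ne_nil (cs : List Char) : pvSplitQ cs ≠ [] := by
  cases cs with
  | nil => simp [pvSplitQ]
  | cons c cs =>
    simp only [pvSplitQ]
    split
    · simp
    · cases h : pvSplitQ cs <;> simp

/-- pieces contributed by all segments after the first -/
def pvEmitTail (segs : List (List Char)) : List (List Char) :=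
  segs.flatMap (fun t => [pvSep] ++ (if t ≠ [] then [pvQuote t] else []))

def pvEmit : List (List Char) → List (List Char)
  | [] => []
  | s :: rest => (if s ≠ [] then [pvQuote s] else []) ++ pvEmitTail rest

/-- A's loop + final flush computes pvEmit of the quote-split (with pending buffer prepended). -/
theorem pvA_loop (cs : List Char) :
    ∀ (parts : List (List Char)) (buf : List Char),
    (let st := cs.foldl
        (fun (s : List (List Char) × List Char) ch =>
          if ch = '\'' then
            ((if s.2 ≠ [] then s.1 ++ [pvQuote s.2] else s.1) ++ [pvSep], [])
          else (s.1, s.2 ++ [ch]))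
        (parts, buf)
     if st.2 ≠ [] then st.1 ++ [pvQuote st.2] else st.1) =
      parts ++ pvEmit (match pvSplitQ cs with
                       | [] => [buf]
                       | s :: r => (buf ++ s) :: r) := by
  induction cs with
  | nil =>
    intro parts buf
    simp only [List.foldl_nil, pvSplitQ, pvEmit, pvEmitTail, List.flatMap_nil, List.append_nil]
    split <;> simp_all
  | cons c cs ih =>
    intro parts buf
    by_cases hc : c = '\''
    · subst hc
      simp only [List.foldl_cons, if_true]
      rw [ih]
      simp only [pvSplitQ, if_true]
      cases hs : pvSplitQ cs with
      | nil => exact absurd hs (pvSplitQ_ne_nil cs)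
      | cons s r =>
        simp only [List.nil_append, pvEmit, pvEmitTail, List.flatMap_cons]
        by_cases hb : buf = [] <;> simp [hb]
    · simp only [List.foldl_cons, if_neg hc]
      rw [ih]
      simp only [pvSplitQ]
      rw [if_neg hc]
      cases hs : pvSplitQ cs with
      | nil => exact absurd hs (pvSplitQ_ne_nil cs)
      | cons s r => simp

/-- pvSplitQ decomposes as head run + split of what follows the first quote -/
theorem pvSplitQ_decomp (cs : List Char) :
    pvSplitQ cs = cs.takeWhile (· ≠ '\'') ::
      (match cs.dropWhile (· ≠ '\'') with
       | [] => []
       | _ :: ds => pvSplitQ ds) := by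
  induction cs with
  | nil => simp [pvSplitQ]
  | cons c cs ih =>
    by_cases hc : c = '\''
    · subst hc
      simp [pvSplitQ]
    · simp only [pvSplitQ, List.takeWhile_cons, List.dropWhile_cons, hc, ih]
      simp [hc]

theorem pvDropWhile_head : ∀ (cs : List Char) (d : Char) (ds : List Char),
    cs.dropWhile (· ≠ '\'') = d :: ds → d = '\'' := by
  intro cs
  induction cs with
  | nil => intro d ds h; simp [List.dropWhile] at h
  | cons c cs ih =>
    intro d ds h
    by_cases hc : c = '\''
    · subst hc
      rw [List.dropWhile_cons] at h
      simp at h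
      exact h.1.symm
    · rw [List.dropWhile_cons, if_pos (by simp [hc])] at h
      exact ih d ds h

theorem pvEmitTail_eq (segs : List (List Char)) (h : segs ≠ []) :
    pvEmitTail segs = pvSep :: pvEmit segs := by
  cases segs with
  | nil => exact absurd rfl h
  | cons s r => simp [pvEmitTail, pvEmit]

theorem pvSplitQ_quote (cs : List Char) : pvSplitQ ('\'' :: cs) = [] :: pvSplitQ cs := by
  simp [pvSplitQ]

theorem pvEmit_quote (cs : List Char) :
    pvEmit (pvSplitQ ('\'' :: cs)) = pvSep :: pvEmit (pvSplitQ cs) := by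
  rw [pvSplitQ_quote, pvEmit, pvEmitTail_eq _ (pvSplitQ_ne_nil cs)]
  simp

theorem pvPiecesB_nil : pvPiecesB [] = [] := by
  rw [pvPiecesB.eq_def]

theorem pvPiecesB_quote (cs : List Char) :
    pvPiecesB ('\'' :: cs) = pvSep :: pvPiecesB cs := by
  rw [pvPiecesB.eq_def]
  simp [pvSep]

/-- B's recursive run-splitting equals pvEmit of the quote-split. -/
theorem pvEmit_splitQ (cs : List Char) : pvEmit (pvSplitQ cs) = pvPiecesB cs := by
  fun_induction pvPiecesB cs with
  | case1 => simp [pvSplitQ, pvEmit, pvEmitTail, pvPiecesB_nil]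
  | case2 cs ih =>
    rw [pvEmit_quote, ih]
    simp [pvSep]
  | case3 c cs hc ih =>
    have htk : (c :: cs).takeWhile (· ≠ '\'') = c :: cs.takeWhile (· ≠ '\'') := by
      simp [hc]
    have hdw : (c :: cs).dropWhile (· ≠ '\'') = cs.dropWhile (· ≠ '\'') := by
      simp [hc]
    rw [hdw] at ih
    rw [pvSplitQ_decomp (c :: cs), htk, hdw]
    cases hd : cs.dropWhile (· ≠ '\'') with
    | nil =>
      simp [pvEmit, pvEmitTail, pvQuote, pvPiecesB_nil, htk]
    | cons d ds =>
      have hdq : d = '\'' := pvDropWhile_head cs d ds hd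
      subst hdq
      rw [hd] at ih
      rw [pvEmit_quote, pvPiecesB_quote] at ih
      have ih' : pvEmit (pvSplitQ ds) = pvPiecesB ds := by simpa using ih
      rw [pvPiecesB_quote]
      rw [show (match ('\'' :: ds : List Char) with
            | [] => ([] : List (List Char))
            | _ :: ds => pvSplitQ ds) = pvSplitQ ds from rfl]
      rw [pvEmit, pvEmitTail_eq _ (pvSplitQ_ne_nil ds), ih']
      simp [pvQuote, htk]

theorem pvParts_eq (cs : List Char) : pvPartsA cs = pvPiecesB cs := by
  rw [← pvEmit_splitQ]
  refine Eq.trans (pvA_loop cs [] []) ?_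
  cases hs : pvSplitQ cs with
  | nil => exact absurd hs (pvSplitQ_ne_nil cs)
  | cons s r => simp

-- ===== VERDICT (by name: the statement is the Claim_ definition above) =====
theorem xpath_string_literal_py_spec : Claim_equal_xpath_string_literal_py := by
  intro value _
  show xpath_string_literal_py value = xpath_string_literal_py_alt value
  unfold xpath_string_literal_py xpath_string_literal_py_alt
  cases h1 : PySem.Str.isIn "'" value <;> cases h2 : PySem.Str.isIn "\"" value <;>
    simp [pvParts_eq]
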